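-- pv_equiv track=rewrite | github.com/SeungminKimdev/study-code | 프로그래머스/2/250136. ［PCCP 기출문제］ 2번 ／ 석유 시추/［PCCP 기출문제］ 2번 ／ 석유 시추.py | solution
-- ===== SOURCE A (Python) =====
-- def solution(land):
--     length = len(land)
--     width = len(land[0])
--     blockLand = [[0]*length for _ in range(width)]
--     visited = [[False]*width for _ in range(length)]
--     blockNum = 1
--     fuel = [0]
--
--     for i in range(length):
--         for j in range(width):
--             if land[i][j] == 1 and not visited[i][j]:
--                 q = [(i,j)]
--                 blockLand[j][i] = blockNum
--                 visited[i][j] = True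
--                 dx = [1,-1,0,0]
--                 dy = [0,0,1,-1]
--                 tempFuel = 1
--                 while q:
--                     nowX, nowY = q.pop(0)
--                     for k in range(4):
--                         nextX = nowX + dx[k]
--                         nextY = nowY + dy[k]
--                         if nextX >= 0 and nextX < length and nextY >= 0 and nextY < width and not visited[nextX][nextY] and land[nextX][nextY] == 1:
--                             q.append((nextX,nextY))
--                             visited[nextX][nextY] = True
--                             blockLand[nextY][nextX] = blockNum
--                             tempFuel += 1
--                 fuel.append(tempFuel)
--                 blockNum += 1
--
--     answer = 0
--     for i in range(width):
--         temp = set(blockLand[i])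
--         tempSum = 0
--         for j in temp:
--             tempSum += fuel[j]
--         answer = max(answer,tempSum)
--     return answer
-- ===== SOURCE B (Python) =====
-- def solution(land):
--     n, m = len(land), len(land[0])
--     seen = [False] * (n * m)
--     colsum = {}
--     best = 0
--     for si in range(n):
--         for sj in range(m):
--             if land[si][sj] != 1 or seen[si * m + sj]:
--                 continue
--             stack = [(si, sj)]
--             comp = []
--             while stack:
--                 x, y = stack.pop()
--                 if seen[x * m + y]:
--                     continue
--                 seen[x * m + y] = True
--                 comp.append((x, y))
--                 if x > 0 and land[x - 1][y] == 1:
--                     stack.append((x - 1, y))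
--                 if x + 1 < n and land[x + 1][y] == 1:
--                     stack.append((x + 1, y))
--                 if y > 0 and land[x][y - 1] == 1:
--                     stack.append((x, y - 1))
--                 if y + 1 < m and land[x][y + 1] == 1:
--                     stack.append((x, y + 1))
--             size = len(comp)
--             for c in {y for _, y in comp}:
--                 s = colsum.get(c, 0) + size
--                 colsum[c] = s
--                 best = max(best, s)
--     return best
-- ===== Notes on version B (the rewrite author's own statement) =====
-- stated objective: alternative
-- what changed: A's BFS flood fill (pop(0) queue, a transposed label matrix, a fuel table and a second per-column set-of-labels summing pass) is replaced by a check-on-pop stack DFS over a flat one-dimensional seen array that pushes neighbours unconditionally and folds each component's size into a per-column dict with a running maximum in a single phase (no labels, no second grid pass).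
import Mathlib
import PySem

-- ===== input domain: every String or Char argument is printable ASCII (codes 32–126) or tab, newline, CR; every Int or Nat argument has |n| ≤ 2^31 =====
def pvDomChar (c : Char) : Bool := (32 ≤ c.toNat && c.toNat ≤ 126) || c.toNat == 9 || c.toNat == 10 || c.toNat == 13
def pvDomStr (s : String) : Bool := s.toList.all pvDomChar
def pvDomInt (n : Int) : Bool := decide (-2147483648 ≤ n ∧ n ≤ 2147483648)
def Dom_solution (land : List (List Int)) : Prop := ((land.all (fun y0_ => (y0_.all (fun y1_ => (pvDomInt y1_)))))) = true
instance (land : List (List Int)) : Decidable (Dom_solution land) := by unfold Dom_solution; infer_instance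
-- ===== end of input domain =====

-- B replaces A's BFS labeling (pop-front queue, transposed label matrix, fuel table and a
-- second per-column set-sum pass) by a check-on-pop stack DFS over a flat one-dimensional
-- seen array, pushing neighbours unconditionally and folding each component's size into a
-- per-column dict with a running maximum in one phase; same return value on Pre_.

-- ===== PORT A =====

-- A's 2-d list helpers: m[i][j] reads / functional writes (Python indexing is in range
-- wherever these are used under Pre_; out-of-range getD defaults are never hit there)
def pvGet2 {α : Type} (m : List (List α)) (i j : Nat) (d : α) : α := (m.getD i []).getD j d

def pvSet2 {α : Type} (m : List (List α)) (i j : Nat) (v : α) : List (List α) :=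
  m.set i ((m.getD i []).set j v)

-- number of False entries of A's visited matrix (termination measure for A's BFS)
def pvFalse (v : List (List Bool)) : Nat := (v.map (fun r => r.countP (fun b => !b))).sum

-- marking an unvisited cell removes exactly one False (used by decreasing_by of A's BFS)
theorem pvFalse_set_true (v : List (List Bool)) (i j : Nat)
    (h : pvGet2 v i j true = false) : pvFalse (pvSet2 v i j true) + 1 = pvFalse v := by
  unfold pvGet2 at h
  have hi : i < v.length := by
    by_contra hx
    rw [not_lt] at hx
    rw [List.getD_eq_default _ _ hx] at h
    simp at h
  have hrow : v.getD i [] = v[i] := List.getD_eq_getElem v [] hi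
  rw [hrow] at h
  have hj : j < v[i].length := by
    by_contra hx
    rw [not_lt] at hx
    rw [List.getD_eq_default _ _ hx] at h
    simp at h
  rw [List.getD_eq_getElem _ _ hj] at h
  unfold pvSet2 pvFalse
  rw [hrow]
  rw [List.set_eq_take_cons_drop _ hi]
  conv_rhs => rw [← List.take_append_drop i v, ← List.getElem_cons_drop hi]
  have hcnt : (v[i].set j true).countP (fun b => !b) + 1 = v[i].countP (fun b => !b) := by
    rw [List.set_eq_take_cons_drop _ hj]
    conv_rhs => rw [← List.take_append_drop j v[i], ← List.getElem_cons_drop hj]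
    simp [List.countP_append, h]
    omega
  simp only [List.map_append, List.map_cons, List.sum_append, List.sum_cons]
  omega

-- a fold whose steps do not increase a measure does not increase it (used by decreasing_by)
theorem pv_foldl_mu_le {σ β : Type} (μ : σ → Nat) (f : σ → β → σ)
    (h : ∀ s b, μ (f s b) ≤ μ s) : ∀ (l : List β) (s : σ), μ (l.foldl f s) ≤ μ s := by
  intro l
  induction l with
  | nil => intro s; simp
  | cons x xs ih => intro s; exact le_trans (ih (f s x)) (h s x)

-- A's BFS neighbour offsets, in A's order (dx=[1,-1,0,0], dy=[0,0,1,-1])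
def pvDirsA : List (Int × Int) := [(1, 0), (-1, 0), (0, 1), (0, -1)]

-- one neighbour test of A's BFS inner `for k in range(4)` loop; state = (blockLand, visited, q, tempFuel)
def pvStepA (land : List (List Int)) (L W : Nat) (bn : Int) (now : Nat × Nat)
    (st : List (List Int) × List (List Bool) × List (Nat × Nat) × Int) (d : Int × Int) :
    List (List Int) × List (List Bool) × List (Nat × Nat) × Int :=
  if 0 ≤ (now.1 : Int) + d.1 ∧ (now.1 : Int) + d.1 < (L : Int) ∧
      0 ≤ (now.2 : Int) + d.2 ∧ (now.2 : Int) + d.2 < (W : Int) ∧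
      pvGet2 st.2.1 ((now.1 : Int) + d.1).toNat ((now.2 : Int) + d.2).toNat true = false ∧
      pvGet2 land ((now.1 : Int) + d.1).toNat ((now.2 : Int) + d.2).toNat 0 = 1 then
    (pvSet2 st.1 ((now.2 : Int) + d.2).toNat ((now.1 : Int) + d.1).toNat bn,
      pvSet2 st.2.1 ((now.1 : Int) + d.1).toNat ((now.2 : Int) + d.2).toNat true,
      st.2.2.1 ++ [(((now.1 : Int) + d.1).toNat, ((now.2 : Int) + d.2).toNat)], st.2.2.2 + 1)
  else st

theorem pvStepA_mu (land : List (List Int)) (L W : Nat) (bn : Int) (now : Nat × Nat)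
    (st : List (List Int) × List (List Bool) × List (Nat × Nat) × Int) (d : Int × Int) :
    pvFalse (pvStepA land L W bn now st d).2.1 + (pvStepA land L W bn now st d).2.2.1.length ≤
      pvFalse st.2.1 + st.2.2.1.length := by
  unfold pvStepA
  split
  · next h =>
    have := pvFalse_set_true st.2.1 ((now.1 : Int) + d.1).toNat ((now.2 : Int) + d.2).toNat h.2.2.2.2.1
    simp only [List.length_append, List.length_cons, List.length_nil]
    omega
  · exact le_refl _

-- A's `while q:` BFS loop; returns (blockLand, visited, tempFuel)
def pvBfsA (land : List (List Int)) (L W : Nat) (bn : Int)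
    (bl : List (List Int)) (vis : List (List Bool)) (q : List (Nat × Nat)) (tf : Int) :
    List (List Int) × List (List Bool) × Int :=
  match q with
  | [] => (bl, vis, tf)
  | now :: rest =>
    let s := pvDirsA.foldl (pvStepA land L W bn now) (bl, vis, [], tf)
    pvBfsA land L W bn s.1 s.2.1 (rest ++ s.2.2.1) s.2.2.2
termination_by pvFalse vis + q.length
decreasing_by
  have := pv_foldl_mu_le (fun st => pvFalse st.2.1 + st.2.2.1.length)
      (pvStepA land L W bn now) (pvStepA_mu land L W bn now) pvDirsA (bl, vis, [], tf)
  simp only [List.length_append, List.length_cons, List.length_nil] at *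
  omega

-- the body of A's double scan loop at cell (i, j); state = (blockLand, visited, blockNum, fuel)
def pvOuterA (land : List (List Int)) (L W : Nat)
    (st : List (List Int) × List (List Bool) × Int × List Int) (i j : Nat) :
    List (List Int) × List (List Bool) × Int × List Int :=
  if pvGet2 land i j 0 = 1 ∧ pvGet2 st.2.1 i j true = false then
    let r := pvBfsA land L W st.2.2.1 (pvSet2 st.1 j i st.2.2.1) (pvSet2 st.2.1 i j true) [(i, j)] 1
    (r.1, r.2.1, st.2.2.1 + 1, st.2.2.2 ++ [r.2.2])
  else st

def solution (land : List (List Int)) : Int :=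
  let L := land.length
  let W := (land.headD []).length
  let st := (List.range L).foldl
    (fun st i => (List.range W).foldl (fun st j => pvOuterA land L W st i j) st)
    (List.replicate W (List.replicate L (0 : Int)), List.replicate L (List.replicate W false),
      (1 : Int), ([0] : List Int))
  (List.range W).foldl
    (fun ans i =>
      max ans ((PySem.Set.ofList (st.1.getD i [])).foldl
        (fun acc j => acc + st.2.2.2.getD j.toNat 0) 0))
    0

-- ===== PORT B =====

-- number of False entries of B's flat seen array (termination measure for B's DFS)
def cfF (s : List Bool) : Nat := s.countP (fun b => !b)

-- marking an unseen flat index removes exactly one False (used by decreasing_by of B's DFS)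
theorem cfF_set_true (s : List Bool) (i : Nat) (h : s.getD i true = false) :
    cfF (s.set i true) + 1 = cfF s := by
  have hi : i < s.length := by
    by_contra hx
    rw [not_lt] at hx
    rw [List.getD_eq_default _ _ hx] at h
    simp at h
  rw [List.getD_eq_getElem _ _ hi] at h
  unfold cfF
  rw [List.set_eq_take_cons_drop _ hi]
  conv_rhs => rw [← List.take_append_drop i s, ← List.getElem_cons_drop hi]
  simp [List.countP_append, h]
  omega

-- B's read of land[x][y] (index in range wherever reached under Pre_)
def pvLand (land : List (List Int)) (x y : Nat) : Int := (land.getD x []).getD y 0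

-- B's four conditional pushes, in Python append order u,d,l,r (head of the list = top of
-- the Python stack, so the last append sits first)
def pvPush (land : List (List Int)) (L W x y : Nat) (rest : List (Nat × Nat)) :
    List (Nat × Nat) :=
  (if y + 1 < W ∧ pvLand land x (y + 1) = 1 then [(x, y + 1)] else []) ++
  (if 0 < y ∧ pvLand land x (y - 1) = 1 then [(x, y - 1)] else []) ++
  (if x + 1 < L ∧ pvLand land (x + 1) y = 1 then [(x + 1, y)] else []) ++
  (if 0 < x ∧ pvLand land (x - 1) y = 1 then [(x - 1, y)] else []) ++ rest

theorem pvPush_length (land : List (List Int)) (L W x y : Nat) (rest : List (Nat × Nat)) :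
    (pvPush land L W x y rest).length ≤ rest.length + 4 := by
  unfold pvPush
  split_ifs <;> simp <;> omega

-- B's `while stack:` check-on-pop DFS; returns (seen, comp)
def pvDfs (land : List (List Int)) (L W : Nat) (seen : List Bool)
    (stack : List (Nat × Nat)) (comp : List (Nat × Nat)) : List Bool × List (Nat × Nat) :=
  match stack with
  | [] => (seen, comp)
  | (x, y) :: rest =>
    if h : seen.getD (x * W + y) true = true then
      pvDfs land L W seen rest comp
    else
      pvDfs land L W (seen.set (x * W + y) true) (pvPush land L W x y rest)
        (comp ++ [(x, y)])
termination_by 5 * cfF seen + stack.length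
decreasing_by
  · simp only [List.length_cons]
    omega
  · have h1 := cfF_set_true seen (x * W + y) (by simpa using h)
    have h2 := pvPush_length land L W x y rest
    simp only [List.length_cons]
    omega

-- the body of B's double scan loop at cell (si, sj); state = (seen, colsum, best)
def pvOuterB (land : List (List Int)) (L W : Nat)
    (st : List Bool × PySem.Dict Int Int × Int) (si sj : Nat) :
    List Bool × PySem.Dict Int Int × Int :=
  if pvLand land si sj = 1 ∧ st.1.getD (si * W + sj) true = false then
    let r := pvDfs land L W st.1 [(si, sj)] []
    let size : Int := r.2.length
    let p := (PySem.Set.ofList (r.2.map (fun c => (c.2 : Int)))).foldl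
      (fun (p : PySem.Dict Int Int × Int) c =>
        (p.1.insert c (p.1.getD c 0 + size), max p.2 (p.1.getD c 0 + size)))
      (st.2.1, st.2.2)
    (r.1, p.1, p.2)
  else st

def solution_alt (land : List (List Int)) : Int :=
  let n := land.length
  let m := (land.headD []).length
  let st := (List.range n).foldl
    (fun st si => (List.range m).foldl (fun st sj => pvOuterB land n m st si sj) st)
    (List.replicate (n * m) false, PySem.Dict.empty, (0 : Int))
  st.2.2

-- ===== PRECONDITION & SPEC =====
-- Pre_ excludes exactly the inputs where the Python A raises IndexError: the empty grid
-- (A indexes land[0]) and grids with a row shorter than row 0 (A reads land[i][j] for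
-- every j < len(land[0])).
def Pre_solution (land : List (List Int)) : Prop :=
  land ≠ [] ∧ ∀ row ∈ land, (land.headD []).length ≤ row.length
instance (land : List (List Int)) : Decidable (Pre_solution land) := by
  unfold Pre_solution; infer_instance

def pvWitness_solution : List (List Int) := [[1, 0], [1, 1]]

def Spec_solution (land : List (List Int)) (out : Int) : Prop := out = solution_alt land
instance (land : List (List Int)) (out : Int) : Decidable (Spec_solution land out) := by
  unfold Spec_solution; infer_instance

-- ===== CLAIM (what is proved, stated in full; the proofs are below) =====
def Claim_equal_solution : Prop :=
  ∀ (land : List (List Int)), Dom_solution land → Pre_solution land →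
    Spec_solution land (solution land)

-- ===== LEMMAS AND PROOFS =====

-- rectangularity of a 2-d list
def Rect2 {α : Type} (L W : Nat) (m : List (List α)) : Prop :=
  m.length = L ∧ ∀ r ∈ m, r.length = W

-- cell c is marked in A's visited matrix (in range)
def memM (L W : Nat) (v : List (List Bool)) (c : Nat × Nat) : Prop :=
  c.1 < L ∧ c.2 < W ∧ pvGet2 v c.1 c.2 true = true

-- cell c is marked in B's flat seen array (in range)
def memF (L W : Nat) (s : List Bool) (c : Nat × Nat) : Prop :=
  c.1 < L ∧ c.2 < W ∧ s.getD (c.1 * W + c.2) true = true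

-- cell c is an in-range land cell
def landP (land : List (List Int)) (L W : Nat) (c : Nat × Nat) : Prop :=
  c.1 < L ∧ c.2 < W ∧ pvGet2 land c.1 c.2 0 = 1

-- 4-adjacency between land cells
def stepR (land : List (List Int)) (L W : Nat) (c d : Nat × Nat) : Prop :=
  landP land L W c ∧ landP land L W d ∧
    ((c.1 = d.1 ∧ (c.2 + 1 = d.2 ∨ d.2 + 1 = c.2)) ∨
     (c.2 = d.2 ∧ (c.1 + 1 = d.1 ∨ d.1 + 1 = c.1)))

def ReachR (land : List (List Int)) (L W : Nat) (s c : Nat × Nat) : Prop :=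
  Relation.ReflTransGen (stepR land L W) s c

-- the exact per-column distinct-label sum A's second phase computes
def colSumA (bl : List (List Int)) (fuel : List Int) (j : Nat) : Int :=
  (PySem.Set.ofList (bl.getD j [])).foldl (fun acc ℓ => acc + fuel.getD ℓ.toNat 0) 0

-- dir offsets used by A's port
def dirOK (dir : Int × Int) : Prop :=
  dir = (1, 0) ∨ dir = (-1, 0) ∨ dir = (0, 1) ∨ dir = (0, -1)

-- cell c is now offset by dir
def offEq (now : Nat × Nat) (dir : Int × Int) (c : Nat × Nat) : Prop :=
  (now.1 : Int) + dir.1 = (c.1 : Int) ∧ (now.2 : Int) + dir.2 = (c.2 : Int)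

theorem pvLand_eq (land : List (List Int)) (x y : Nat) :
    pvLand land x y = pvGet2 land x y 0 := rfl

theorem rect2_set {α : Type} {L W : Nat} {v : List (List α)} (h : Rect2 L W v)
    (a b : Nat) (x : α) : Rect2 L W (pvSet2 v a b x) := by
  obtain ⟨hl, hw⟩ := h
  by_cases ha : a < v.length
  · refine ⟨by simp [pvSet2, hl], ?_⟩
    intro r hr
    rcases List.mem_or_eq_of_mem_set hr with h | h
    · exact hw r h
    · subst h
      rw [List.length_set, List.getD_eq_getElem v [] ha]
      exact hw _ (List.getElem_mem ha)
  · unfold pvSet2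
    rw [List.set_eq_of_length_le (by omega)]
    exact ⟨hl, hw⟩

theorem get2_set2 {α : Type} {L W : Nat} {v : List (List α)} (h : Rect2 L W v)
    {a b : Nat} (ha : a < L) (hb : b < W) (x : α) (i j : Nat) (dflt : α) :
    pvGet2 (pvSet2 v a b x) i j dflt = if i = a ∧ j = b then x else pvGet2 v i j dflt := by
  obtain ⟨hl, hw⟩ := h
  have hav : a < v.length := by omega
  have hrow : v.getD a [] = v[a] := List.getD_eq_getElem v [] hav
  have hrl : v[a].length = W := hw _ (List.getElem_mem hav)
  unfold pvGet2 pvSet2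
  by_cases hia : i = a
  · subst hia
    have h1 : (v.set i ((v.getD i []).set b x)).getD i [] = (v.getD i []).set b x := by
      rw [List.getD_eq_getElem _ _ (by simpa using hav)]
      simp
    rw [h1, hrow]
    by_cases hjb : j = b
    · subst hjb
      simp only [true_and]
      rw [List.getD_eq_getElem _ _ (by rw [List.length_set]; omega)]
      simp
    · rw [if_neg (by tauto)]
      by_cases hjl : j < W
      · rw [List.getD_eq_getElem _ _ (by rw [List.length_set]; omega),
          List.getD_eq_getElem _ _ (by omega)]
        exact List.getElem_set_ne (show b ≠ j from by omega) _
      · rw [List.getD_eq_default _ _ (by rw [List.length_set]; omega),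
          List.getD_eq_default _ _ (by omega)]
  · rw [if_neg (by tauto)]
    have h1 : (v.set a ((v.getD a []).set b x)).getD i [] = v.getD i [] := by
      by_cases hil : i < v.length
      · rw [List.getD_eq_getElem _ _ (by simpa using hil), List.getD_eq_getElem _ _ hil]
        exact List.getElem_set_ne (show a ≠ i from fun hh => hia hh.symm) _
      · rw [List.getD_eq_default _ _ (by simpa using (le_of_not_gt hil)),
          List.getD_eq_default _ _ (le_of_not_gt hil)]
    rw [h1]

theorem stepR_symm {land : List (List Int)} {L W : Nat} {c d : Nat × Nat}
    (h : stepR land L W c d) : stepR land L W d c := by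
  obtain ⟨h1, h2, h3⟩ := h
  exact ⟨h2, h1, by omega⟩

theorem reach_symm {land : List (List Int)} {L W : Nat} {s c : Nat × Nat}
    (h : ReachR land L W s c) : ReachR land L W c s := by
  induction h with
  | refl => exact Relation.ReflTransGen.refl
  | tail _ h2 ih =>
    exact Relation.ReflTransGen.trans (Relation.ReflTransGen.single (stepR_symm h2)) ih

theorem reach_land {land : List (List Int)} {L W : Nat} {s c : Nat × Nat}
    (hs : landP land L W s) (h : ReachR land L W s c) : landP land L W c := by
  induction h with
  | refl => exact hs
  | tail _ h2 _ => exact h2.2.1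

theorem closed_reach {land : List (List Int)} {L W : Nat} {v : List (List Bool)}
    {q : List (Nat × Nat)}
    (hcl : ∀ c, memM L W v c → c ∉ q → ∀ d, stepR land L W c d → memM L W v d)
    {s t : Nat × Nat} (hs : memM L W v s) (h : ReachR land L W s t) :
    memM L W v t ∨ ∃ u ∈ q, ReachR land L W u t := by
  revert hs
  induction h using Relation.ReflTransGen.head_induction_on with
  | refl => intro hs; exact Or.inl hs
  | @head a c hstep hrest ih =>
    intro hs
    by_cases haq : a ∈ q
    · exact Or.inr ⟨a, haq, Relation.ReflTransGen.head hstep hrest⟩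
    · exact ih (hcl a hs haq c hstep)

-- a predicate closed under stepR holds along every path (used for B's DFS)
theorem reach_of_closed {land : List (List Int)} {L W : Nat} {P : Nat × Nat → Prop}
    (hcl : ∀ c, P c → ∀ d, stepR land L W c d → P d) {s t : Nat × Nat}
    (hs : P s) (h : ReachR land L W s t) : P t := by
  induction h with
  | refl => exact hs
  | tail _ h2 ih => exact hcl _ ih _ h2

-- every adjacency is realised by one of the four offsets
theorem stepR_dir {land : List (List Int)} {L W : Nat} {c d : Nat × Nat}
    (h : stepR land L W c d) : ∃ dir, dirOK dir ∧ offEq c dir d := by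
  obtain ⟨_, _, h3⟩ := h
  rcases h3 with ⟨h1, h2 | h2⟩ | ⟨h1, h2 | h2⟩
  · exact ⟨(0, 1), by unfold dirOK; tauto, by unfold offEq; constructor <;> simp <;> omega⟩
  · exact ⟨(0, -1), by unfold dirOK; tauto, by unfold offEq; constructor <;> simp <;> omega⟩
  · exact ⟨(1, 0), by unfold dirOK; tauto, by unfold offEq; constructor <;> simp <;> omega⟩
  · exact ⟨(-1, 0), by unfold dirOK; tauto, by unfold offEq; constructor <;> simp <;> omega⟩

-- a valid offset from a land cell to an in-range land cell is an adjacency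
theorem dir_stepR {land : List (List Int)} {L W : Nat} {now c : Nat × Nat} {dir : Int × Int}
    (hd : dirOK dir) (hnow : landP land L W now) (hc : landP land L W c)
    (ho : offEq now dir c) : stepR land L W now c := by
  obtain ⟨h1, h2⟩ := ho
  refine ⟨hnow, hc, ?_⟩
  rcases hd with h | h | h | h <;> subst h <;> simp at h1 h2 <;> omega

theorem off_toNat {now : Nat × Nat} {d : Int × Int} {c : Nat × Nat}
    (ho : offEq now d c) :
    (((now.1 : Int) + d.1).toNat, ((now.2 : Int) + d.2).toNat) = c := by
  obtain ⟨h1, h2⟩ := ho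
  apply Prod.ext <;> simp <;> omega

theorem memM_set {L W : Nat} {v : List (List Bool)} (hv : Rect2 L W v) {c0 : Nat × Nat}
    (h1 : c0.1 < L) (h2 : c0.2 < W) (c : Nat × Nat) :
    memM L W (pvSet2 v c0.1 c0.2 true) c ↔ memM L W v c ∨ c = c0 := by
  unfold memM
  rw [get2_set2 hv h1 h2]
  by_cases hc : c.1 = c0.1 ∧ c.2 = c0.2
  · rw [if_pos hc]
    have : c = c0 := Prod.ext_iff.mpr hc
    subst this
    constructor
    · intro _; exact Or.inr rfl
    · intro _; exact ⟨h1, h2, rfl⟩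
  · rw [if_neg hc]
    constructor
    · intro h; exact Or.inl h
    · rintro (h | h)
      · exact h
      · exact absurd (Prod.ext_iff.mp h) hc

theorem notMemM_false {L W : Nat} {v : List (List Bool)} {c : Nat × Nat}
    (hc1 : c.1 < L) (hc2 : c.2 < W) (h : ¬ memM L W v c) :
    pvGet2 v c.1 c.2 true = false := by
  unfold memM at h
  cases hb : pvGet2 v c.1 c.2 true
  · rfl
  · exact absurd ⟨hc1, hc2, hb⟩ h

theorem false_notMemM {L W : Nat} {v : List (List Bool)} {c : Nat × Nat}
    (h : pvGet2 v c.1 c.2 true = false) : ¬ memM L W v c := by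
  intro hm
  rw [hm.2.2] at h
  exact Bool.true_eq_false.mp h

-- characterisation of A's 4-neighbour expansion fold
theorem foldA_char (land : List (List Int)) (L W : Nat) (bn : Int) (now : Nat × Nat)
    (hnow : landP land L W now) :
    ∀ (ds : List (Int × Int)), (∀ dir ∈ ds, dirOK dir) →
    ∀ (bl : List (List Int)) (vis : List (List Bool)) (q0 : List (Nat × Nat)) (tf : Int),
      Rect2 L W vis → Rect2 W L bl →
    ∃ new : List (Nat × Nat),
      (ds.foldl (pvStepA land L W bn now) (bl, vis, q0, tf)).2.2.1 = q0 ++ new ∧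
      Rect2 L W (ds.foldl (pvStepA land L W bn now) (bl, vis, q0, tf)).2.1 ∧
      Rect2 W L (ds.foldl (pvStepA land L W bn now) (bl, vis, q0, tf)).1 ∧
      (∀ c, memM L W (ds.foldl (pvStepA land L W bn now) (bl, vis, q0, tf)).2.1 c ↔
        memM L W vis c ∨ c ∈ new) ∧
      (∀ c ∈ new, stepR land L W now c ∧ ¬ memM L W vis c) ∧
      (∀ c, (∃ dir ∈ ds, offEq now dir c) → landP land L W c → ¬ memM L W vis c → c ∈ new) ∧
      pvFalse (ds.foldl (pvStepA land L W bn now) (bl, vis, q0, tf)).2.1 + new.length =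
        pvFalse vis ∧
      (ds.foldl (pvStepA land L W bn now) (bl, vis, q0, tf)).2.2.2 = tf + new.length ∧
      (∀ c ∈ new, pvGet2 (ds.foldl (pvStepA land L W bn now) (bl, vis, q0, tf)).1 c.2 c.1 0 = bn) ∧
      (∀ a b : Nat, a < L → b < W → (a, b) ∉ new →
        pvGet2 (ds.foldl (pvStepA land L W bn now) (bl, vis, q0, tf)).1 b a 0 =
          pvGet2 bl b a 0) := by
  intro ds
  induction ds with
  | nil =>
    intro _ bl vis q0 tf hv hb
    refine ⟨[], by simp, hv, hb, by simp, by simp, ?_, by simp, by simp, by simp,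
      by intro a b _ _ _; rfl⟩
    rintro c ⟨dir, hdir, _⟩ _ _
    simp at hdir
  | cons d ds ih =>
    intro hds bl vis q0 tf hv hb
    simp only [List.foldl_cons]
    by_cases hg : (0 ≤ (now.1 : Int) + d.1 ∧ (now.1 : Int) + d.1 < (L : Int) ∧
        0 ≤ (now.2 : Int) + d.2 ∧ (now.2 : Int) + d.2 < (W : Int) ∧
        pvGet2 vis ((now.1 : Int) + d.1).toNat ((now.2 : Int) + d.2).toNat true = false ∧
        pvGet2 land ((now.1 : Int) + d.1).toNat ((now.2 : Int) + d.2).toNat 0 = 1)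
    · have hstep1 : pvStepA land L W bn now (bl, vis, q0, tf) d =
          (pvSet2 bl ((now.2 : Int) + d.2).toNat ((now.1 : Int) + d.1).toNat bn,
           pvSet2 vis ((now.1 : Int) + d.1).toNat ((now.2 : Int) + d.2).toNat true,
           q0 ++ [(((now.1 : Int) + d.1).toNat, ((now.2 : Int) + d.2).toNat)], tf + 1) := by
        unfold pvStepA
        rw [if_pos hg]
      rw [hstep1]
      obtain ⟨hg1, hg2, hg3, hg4, hg5, hg6⟩ := hg
      have hc01 : (((now.1 : Int) + d.1).toNat) < L := by omega
      have hc02 : (((now.2 : Int) + d.2).toNat) < W := by omega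
      have hv1 : Rect2 L W (pvSet2 vis ((now.1 : Int) + d.1).toNat ((now.2 : Int) + d.2).toNat true) :=
        rect2_set hv _ _ _
      have hb1 : Rect2 W L (pvSet2 bl ((now.2 : Int) + d.2).toNat ((now.1 : Int) + d.1).toNat bn) :=
        rect2_set hb _ _ _
      obtain ⟨new', hq, hrv, hrb, hmem, hnewP, hcomp, hfalse, htf, hbl1, hbl2⟩ :=
        ih (fun dir hdir => hds dir (List.mem_cons_of_mem d hdir)) _ _
          (q0 ++ [(((now.1 : Int) + d.1).toNat, ((now.2 : Int) + d.2).toNat)]) (tf + 1) hv1 hb1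
      have hmem1 : ∀ c, memM L W (pvSet2 vis ((now.1 : Int) + d.1).toNat
          ((now.2 : Int) + d.2).toNat true) c ↔ memM L W vis c ∨
          c = (((now.1 : Int) + d.1).toNat, ((now.2 : Int) + d.2).toNat) :=
        memM_set hv (c0 := (((now.1 : Int) + d.1).toNat, ((now.2 : Int) + d.2).toNat)) hc01 hc02
      have hland0 : landP land L W (((now.1 : Int) + d.1).toNat, ((now.2 : Int) + d.2).toNat) :=
        ⟨hc01, hc02, hg6⟩
      have hoff0 : offEq now d (((now.1 : Int) + d.1).toNat, ((now.2 : Int) + d.2).toNat) := by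
        constructor <;> simp <;> omega
      have hstep0 : stepR land L W now (((now.1 : Int) + d.1).toNat, ((now.2 : Int) + d.2).toNat) :=
        dir_stepR (hds d List.mem_cons_self) hnow hland0 hoff0
      have hnv0 : ¬ memM L W vis (((now.1 : Int) + d.1).toNat, ((now.2 : Int) + d.2).toNat) :=
        false_notMemM hg5
      have hc0nin : (((now.1 : Int) + d.1).toNat, ((now.2 : Int) + d.2).toNat) ∉ new' := by
        intro hmem'
        exact (hnewP _ hmem').2 ((hmem1 _).mpr (Or.inr rfl))
      refine ⟨(((now.1 : Int) + d.1).toNat, ((now.2 : Int) + d.2).toNat) :: new',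
        ?_, hrv, hrb, ?_, ?_, ?_, ?_, ?_, ?_, ?_⟩
      · rw [hq]
        simp
      · intro c
        rw [hmem c, hmem1 c]
        simp only [List.mem_cons]
        tauto
      · intro c hc
        rcases List.mem_cons.mp hc with h | h
        · subst h
          exact ⟨hstep0, hnv0⟩
        · obtain ⟨h1, h2⟩ := hnewP c h
          refine ⟨h1, fun hmv => h2 ((hmem1 c).mpr (Or.inl hmv))⟩
      · rintro c ⟨dir, hdir, hoff⟩ hlc hnm
        rcases List.mem_cons.mp hdir with h | h
        · have hoff' : offEq now d c := h ▸ hoff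
          have : (((now.1 : Int) + d.1).toNat, ((now.2 : Int) + d.2).toNat) = c := off_toNat hoff'
          rw [← this]
          exact List.mem_cons_self
        · by_cases hceq : c = (((now.1 : Int) + d.1).toNat, ((now.2 : Int) + d.2).toNat)
          · rw [hceq]
            exact List.mem_cons_self
          · have : c ∈ new' := hcomp c ⟨dir, h, hoff⟩ hlc
              (fun hm1 => by rcases (hmem1 c).mp hm1 with h' | h' <;> [exact hnm h'; exact hceq h'])
            exact List.mem_cons_of_mem _ this
      · have hft := pvFalse_set_true vis ((now.1 : Int) + d.1).toNat ((now.2 : Int) + d.2).toNat hg5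
        simp only [List.length_cons]
        omega
      · rw [htf]
        simp only [List.length_cons]
        push_cast
        ring
      · intro c hc
        rcases List.mem_cons.mp hc with h | h
        · subst h
          have := hbl2 (((now.1 : Int) + d.1).toNat) (((now.2 : Int) + d.2).toNat) hc01 hc02 hc0nin
          rw [this, get2_set2 hb hc02 hc01, if_pos ⟨rfl, rfl⟩]
        · exact hbl1 c h
      · intro a b ha hb' hnin
        have hne : (a, b) ≠ (((now.1 : Int) + d.1).toNat, ((now.2 : Int) + d.2).toNat) :=
          fun h => hnin (h ▸ List.mem_cons_self)
        have hnin' : (a, b) ∉ new' := fun h => hnin (List.mem_cons_of_mem _ h)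
        rw [hbl2 a b ha hb' hnin', get2_set2 hb hc02 hc01]
        rw [if_neg]
        intro ⟨h1, h2⟩
        exact hne (Prod.ext_iff.mpr ⟨h2, h1⟩)
    · have hstep1 : pvStepA land L W bn now (bl, vis, q0, tf) d = (bl, vis, q0, tf) := by
        unfold pvStepA
        rw [if_neg hg]
      rw [hstep1]
      obtain ⟨new', hq, hrv, hrb, hmem, hnewP, hcomp, hfalse, htf, hbl1, hbl2⟩ :=
        ih (fun dir hdir => hds dir (List.mem_cons_of_mem d hdir)) bl vis q0 tf hv hb
      refine ⟨new', hq, hrv, hrb, hmem, hnewP, ?_, hfalse, htf, hbl1, hbl2⟩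
      rintro c ⟨dir, hdir, hoff⟩ hlc hnm
      rcases List.mem_cons.mp hdir with h | h
      · exfalso
        apply hg
        have hoff' : offEq now d c := h ▸ hoff
        have hco : (((now.1 : Int) + d.1).toNat, ((now.2 : Int) + d.2).toNat) = c := off_toNat hoff'
        obtain ⟨ho1, ho2⟩ := hoff'
        obtain ⟨hl1, hl2, hl3⟩ := hlc
        refine ⟨by omega, by omega, by omega, by omega, ?_, ?_⟩
        · have := notMemM_false hl1 hl2 hnm
          rw [← hco] at this
          simpa using this
        · have := hl3
          rw [← hco] at this
          simpa using this
      · exact hcomp c ⟨dir, h, hoff⟩ hlc hnm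

theorem dirsA_ok : ∀ dir ∈ pvDirsA, dirOK dir := by
  intro dir hdir
  simp [pvDirsA] at hdir
  rcases hdir with h | h | h | h <;> subst h <;> unfold dirOK <;> tauto

theorem dirOK_memA {dir : Int × Int} (h : dirOK dir) : dir ∈ pvDirsA := by
  rcases h with h | h | h | h <;> subst h <;> simp [pvDirsA]

-- characterisation of A's whole BFS loop
theorem bfsA_char (land : List (List Int)) (L W : Nat) (bn : Int) :
    ∀ (n : Nat) (bl : List (List Int)) (vis : List (List Bool)) (q : List (Nat × Nat)) (tf : Int),
      pvFalse vis + q.length = n →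
      Rect2 L W vis → Rect2 W L bl →
      (∀ c ∈ q, landP land L W c ∧ memM L W vis c) →
      (∀ c, memM L W vis c → c ∉ q → ∀ d, stepR land L W c d → memM L W vis d) →
      Rect2 L W (pvBfsA land L W bn bl vis q tf).2.1 ∧
      Rect2 W L (pvBfsA land L W bn bl vis q tf).1 ∧
      (∀ c, memM L W (pvBfsA land L W bn bl vis q tf).2.1 c ↔
        memM L W vis c ∨ ∃ s ∈ q, ReachR land L W s c) ∧
      (pvBfsA land L W bn bl vis q tf).2.2 + (pvFalse (pvBfsA land L W bn bl vis q tf).2.1 : Int) =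
        tf + (pvFalse vis : Int) ∧
      tf ≤ (pvBfsA land L W bn bl vis q tf).2.2 ∧
      (∀ c : Nat × Nat, c.1 < L → c.2 < W →
        memM L W (pvBfsA land L W bn bl vis q tf).2.1 c → ¬ memM L W vis c →
        pvGet2 (pvBfsA land L W bn bl vis q tf).1 c.2 c.1 0 = bn) ∧
      (∀ c : Nat × Nat, c.1 < L → c.2 < W →
        (memM L W (pvBfsA land L W bn bl vis q tf).2.1 c → memM L W vis c) →
        pvGet2 (pvBfsA land L W bn bl vis q tf).1 c.2 c.1 0 = pvGet2 bl c.2 c.1 0) := by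
  intro n
  induction n using Nat.strong_induction_on with
  | _ n ihn =>
  intro bl vis q tf hn hv hb hq hcl
  cases q with
  | nil =>
    rw [pvBfsA]
    refine ⟨hv, hb, ?_, by push_cast; ring, le_refl _, ?_, ?_⟩
    · intro c
      simp
    · intro c _ _ hm hnm
      exact absurd hm hnm
    · intro c _ _ _
      rfl
  | cons now rest =>
    rw [pvBfsA]
    have hnow : landP land L W now := (hq now List.mem_cons_self).1
    obtain ⟨new, hqf, hrv, hrb, hmem, hnewP, hcomp, hfalse, htf, hbl1, hbl2⟩ :=
      foldA_char land L W bn now hnow pvDirsA dirsA_ok bl vis [] tf hv hb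
    have hqeq : (pvDirsA.foldl (pvStepA land L W bn now) (bl, vis, [], tf)).2.2.1 = new := by
      rw [hqf]; simp
    rw [hqeq] at *
    -- invariants for the recursive state
    have hq' : ∀ c ∈ rest ++ new, landP land L W c ∧
        memM L W (pvDirsA.foldl (pvStepA land L W bn now) (bl, vis, [], tf)).2.1 c := by
      intro c hc
      rcases List.mem_append.mp hc with h | h
      · exact ⟨(hq c (List.mem_cons_of_mem now h)).1,
          (hmem c).mpr (Or.inl (hq c (List.mem_cons_of_mem now h)).2)⟩
      · exact ⟨(hnewP c h).1.2.1, (hmem c).mpr (Or.inr h)⟩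
    have hcl' : ∀ c, memM L W (pvDirsA.foldl (pvStepA land L W bn now) (bl, vis, [], tf)).2.1 c →
        c ∉ rest ++ new → ∀ e, stepR land L W c e →
        memM L W (pvDirsA.foldl (pvStepA land L W bn now) (bl, vis, [], tf)).2.1 e := by
      intro c hmc hcq e hstep
      rcases (hmem c).mp hmc with hmv | hcnew
      · by_cases hcnow : c = now
        · subst hcnow
          obtain ⟨dir, hdOK, hoff⟩ := stepR_dir hstep
          by_cases hmd : memM L W vis e
          · exact (hmem e).mpr (Or.inl hmd)
          · exact (hmem e).mpr (Or.inr
              (hcomp e ⟨dir, dirOK_memA hdOK, hoff⟩ hstep.2.1 hmd))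
        · have : c ∉ now :: rest := by
            intro hcr
            rcases List.mem_cons.mp hcr with h | h
            · exact hcnow h
            · exact hcq (List.mem_append_left _ h)
          exact (hmem e).mpr (Or.inl (hcl c hmv this e hstep))
      · exact absurd (List.mem_append_right _ hcnew) hcq
    have hmeas : pvFalse (pvDirsA.foldl (pvStepA land L W bn now) (bl, vis, [], tf)).2.1 +
        (rest ++ new).length < n := by
      rw [List.length_append]
      simp only [List.length_cons] at hn
      omega
    obtain ⟨hRv, hRb, hRmem, hRcons, hRle, hRbl1, hRbl2⟩ :=
      ihn _ hmeas (pvDirsA.foldl (pvStepA land L W bn now) (bl, vis, [], tf)).1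
        (pvDirsA.foldl (pvStepA land L W bn now) (bl, vis, [], tf)).2.1 (rest ++ new)
        (pvDirsA.foldl (pvStepA land L W bn now) (bl, vis, [], tf)).2.2.2 rfl hrv hrb hq' hcl'
    refine ⟨hRv, hRb, ?_, ?_, ?_, ?_, ?_⟩
    · intro c
      rw [hRmem c]
      constructor
      · rintro (hm1 | ⟨s, hs, hreach⟩)
        · rcases (hmem c).mp hm1 with h | h
          · exact Or.inl h
          · exact Or.inr ⟨now, List.mem_cons_self,
              Relation.ReflTransGen.single (hnewP c h).1⟩
        · rcases List.mem_append.mp hs with h | h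
          · exact Or.inr ⟨s, List.mem_cons_of_mem now h, hreach⟩
          · exact Or.inr ⟨now, List.mem_cons_self,
              Relation.ReflTransGen.head (hnewP s h).1 hreach⟩
      · rintro (hmv | ⟨s, hs, hreach⟩)
        · exact Or.inl ((hmem c).mpr (Or.inl hmv))
        · rcases List.mem_cons.mp hs with h | h
          · subst h
            rcases closed_reach hcl' ((hmem s).mpr (Or.inl (hq s List.mem_cons_self).2))
              hreach with h' | ⟨u, hu, hru⟩
            · exact Or.inl h'
            · exact Or.inr ⟨u, hu, hru⟩
          · exact Or.inr ⟨s, List.mem_append_left _ h, hreach⟩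
    · omega
    · omega
    · intro c hc1 hc2 hmR hnmv
      by_cases hm1 : memM L W (pvDirsA.foldl (pvStepA land L W bn now) (bl, vis, [], tf)).2.1 c
      · rcases (hmem c).mp hm1 with h | h
        · exact absurd h hnmv
        · rw [hRbl2 c hc1 hc2 (fun _ => hm1)]
          exact hbl1 c h
      · exact hRbl1 c hc1 hc2 hmR hm1
    · intro c hc1 hc2 himp
      by_cases hmR : memM L W (pvBfsA land L W bn
          (pvDirsA.foldl (pvStepA land L W bn now) (bl, vis, [], tf)).1
          (pvDirsA.foldl (pvStepA land L W bn now) (bl, vis, [], tf)).2.1 (rest ++ new)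
          (pvDirsA.foldl (pvStepA land L W bn now) (bl, vis, [], tf)).2.2.2).2.1 c
      · have hmv := himp hmR
        have hnin : c ∉ new := fun h => (hnewP c h).2 hmv
        rw [hRbl2 c hc1 hc2 (fun _ => (hmem c).mpr (Or.inl hmv))]
        have := hbl2 c.1 c.2 hc1 hc2 (by simpa using hnin)
        simpa using this
      · have hnF : ¬ memM L W (pvDirsA.foldl (pvStepA land L W bn now) (bl, vis, [], tf)).2.1 c :=
          fun h => hmR ((hRmem c).mpr (Or.inl h))
        have hnin : c ∉ new := fun h => hnF ((hmem c).mpr (Or.inr h))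
        rw [hRbl2 c hc1 hc2 (fun h => absurd h hmR)]
        have := hbl2 c.1 c.2 hc1 hc2 (by simpa using hnin)
        simpa using this

-- ===== B-side lemmas =====

theorem idx_lt {L W i j : Nat} (hi : i < L) (hj : j < W) : i * W + j < L * W := by
  calc i * W + j < i * W + W := by omega
    _ = (i + 1) * W := by ring
    _ ≤ L * W := Nat.mul_le_mul_right W hi

theorem idx_lt_of_lt {W i j x y : Nat} (hj : j < W) (hix : i < x) :
    i * W + j < x * W + y := by
  calc i * W + j < i * W + W := by omega
    _ = (i + 1) * W := by ring
    _ ≤ x * W := Nat.mul_le_mul_right W hix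
    _ ≤ x * W + y := by omega

theorem idx_inj {W i j x y : Nat} (hj : j < W) (hy : y < W)
    (h : i * W + j = x * W + y) : i = x ∧ j = y := by
  rcases lt_trichotomy i x with hlt | heq | hgt
  · exact absurd h (Nat.ne_of_lt (idx_lt_of_lt (y := y) hj hlt))
  · subst heq
    exact ⟨rfl, Nat.add_left_cancel h⟩
  · exact absurd h (Nat.ne_of_gt (idx_lt_of_lt (y := j) hy hgt))

theorem getD_set_bool (s : List Bool) (i j : Nat) (a d : Bool) :
    (s.set i a).getD j d = if j = i ∧ i < s.length then a else s.getD j d := by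
  by_cases hij : j = i ∧ i < s.length
  · obtain ⟨h1, h2⟩ := hij
    subst h1
    rw [if_pos ⟨rfl, h2⟩, List.getD_eq_getElem _ _ (by simpa using h2)]
    simp
  · rw [if_neg hij]
    by_cases hj : j < s.length
    · rw [List.getD_eq_getElem _ _ (by simpa using hj), List.getD_eq_getElem _ _ hj]
      by_cases hji : j = i
      · exact absurd ⟨hji, hji ▸ hj⟩ hij
      · exact List.getElem_set_ne (fun hh => hji hh.symm) _
    · rw [List.getD_eq_default _ _ (by simpa using (le_of_not_gt hj)),
        List.getD_eq_default _ _ (le_of_not_gt hj)]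

theorem memF_set {L W : Nat} {s : List Bool} {x y : Nat} (hx : x < L) (hy : y < W)
    (hlen : x * W + y < s.length) (c : Nat × Nat) :
    memF L W (s.set (x * W + y) true) c ↔ memF L W s c ∨ c = (x, y) := by
  unfold memF
  rw [getD_set_bool]
  by_cases hc : c.1 * W + c.2 = x * W + y
  · rw [if_pos ⟨hc, hlen⟩]
    constructor
    · rintro ⟨h1, h2, _⟩
      right
      obtain ⟨e1, e2⟩ := idx_inj h2 hy hc
      exact Prod.ext e1 e2
    · rintro (⟨h1, h2, _⟩ | hceq)
      · exact ⟨h1, h2, rfl⟩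
      · subst hceq
        exact ⟨hx, hy, rfl⟩
  · rw [if_neg (fun hh => hc hh.1)]
    constructor
    · exact Or.inl
    · rintro (h | h)
      · exact h
      · exact absurd (by rw [h]) hc

theorem getD_false_lt {s : List Bool} {i : Nat} (h : s.getD i true = false) :
    i < s.length := by
  by_contra hx
  rw [not_lt] at hx
  rw [List.getD_eq_default _ _ hx] at h
  simp at h

-- counting bridge: flat count over indices
theorem cfF_eq_range (s : List Bool) :
    cfF s = (List.range s.length).countP (fun j => !(s.getD j true)) := by
  induction s with
  | nil => simp [cfF]
  | cons b t ih =>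
    unfold cfF at *
    rw [List.countP_cons]
    simp only [List.length_cons, List.range_succ_eq_map, List.countP_cons, List.countP_map]
    have h1 : (List.range t.length).countP
        ((fun j => !((b :: t).getD j true)) ∘ Nat.succ) =
        (List.range t.length).countP (fun j => !(t.getD j true)) := by
      apply List.countP_congr
      intro a _
      simp [List.getD_cons_succ]
    rw [h1, ← ih]
    simp [List.getD_cons_zero]

theorem countP_range_mul (W : Nat) (p : Nat → Bool) :
    ∀ L, (List.range (L * W)).countP p =
      ((List.range L).map (fun i => (List.range W).countP (fun j => p (i * W + j)))).sum := by
  intro L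
  induction L with
  | zero => simp
  | succ L ih =>
    have h1 : (L + 1) * W = L * W + W := by ring
    rw [h1, List.range_add, List.countP_append, List.countP_map, ih,
      List.range_succ, List.map_append, List.sum_append]
    simp only [List.map_cons, List.map_nil, List.sum_cons, List.sum_nil, add_zero]
    congr 1
theorem pvFalse_rows (W : Nat) : ∀ (vis : List (List Bool)), (∀ r ∈ vis, r.length = W) →
    pvFalse vis = ((List.range vis.length).map
      (fun i => (List.range W).countP (fun j => !(pvGet2 vis i j true)))).sum := by
  intro vis
  induction vis with
  | nil => intro _; simp [pvFalse]
  | cons r t ih =>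
    intro hw
    have hr : r.length = W := hw r List.mem_cons_self
    have hhead : (List.range W).countP (fun j => !(pvGet2 (r :: t) 0 j true)) =
        r.countP (fun b => !b) := by
      have h2 := cfF_eq_range r
      unfold cfF at h2
      rw [h2, hr]
      apply List.countP_congr
      intro a _
      rfl
    have htail := ih (fun r hr => hw r (List.mem_cons_of_mem _ hr))
    show (List.map (fun r => r.countP (fun b => !b)) (r :: t)).sum = _
    simp only [List.map_cons, List.sum_cons, List.length_cons, List.range_succ_eq_map,
      List.map_map]
    rw [← hhead]
    have htail' : (List.map (fun r => List.countP (fun b => !b) r) t).sum =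
        ((List.range t.length).map
          (fun i => (List.range W).countP (fun j => !(pvGet2 t i j true)))).sum := htail
    rw [htail']
    congr 1
theorem count_bridge (L W : Nat) (vis : List (List Bool)) (s : List Bool)
    (hv : Rect2 L W vis) (hlen : s.length = L * W)
    (hpt : ∀ i j, i < L → j < W → pvGet2 vis i j true = s.getD (i * W + j) true) :
    pvFalse vis = cfF s := by
  rw [cfF_eq_range, hlen, countP_range_mul, pvFalse_rows W vis hv.2, hv.1]
  apply congrArg List.sum
  apply List.map_congr_left
  intro i hi
  apply List.countP_congr
  intro j hj
  rw [hpt i j (List.mem_range.mp hi) (List.mem_range.mp hj)]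

-- membership in B's push list
theorem mem_ite_single {α : Type} (p : Prop) [Decidable p] (a c : α) :
    c ∈ (if p then [a] else ([] : List α)) ↔ p ∧ c = a := by
  split_ifs with h <;> simp [h]

theorem pvPush_mem (land : List (List Int)) (L W x y : Nat) (rest : List (Nat × Nat))
    (c : Nat × Nat) :
    c ∈ pvPush land L W x y rest ↔ c ∈ rest ∨
      (0 < x ∧ pvLand land (x - 1) y = 1 ∧ c = (x - 1, y)) ∨
      (x + 1 < L ∧ pvLand land (x + 1) y = 1 ∧ c = (x + 1, y)) ∨
      (0 < y ∧ pvLand land x (y - 1) = 1 ∧ c = (x, y - 1)) ∨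
      (y + 1 < W ∧ pvLand land x (y + 1) = 1 ∧ c = (x, y + 1)) := by
  unfold pvPush
  simp only [List.mem_append, mem_ite_single]
  tauto

-- every adjacency out of (x, y) is pushed
theorem pvPush_complete {land : List (List Int)} {L W : Nat} {x y : Nat} {d : Nat × Nat}
    (h : stepR land L W (x, y) d) (rest : List (Nat × Nat)) :
    d ∈ pvPush land L W x y rest := by
  obtain ⟨hc, hd, hadj⟩ := h
  obtain ⟨hd1, hd2, hd3⟩ := hd
  rw [pvPush_mem]
  right
  have hdp : d = (d.1, d.2) := rfl
  rcases hadj with ⟨h1, h2 | h2⟩ | ⟨h1, h2 | h2⟩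
  · refine Or.inr (Or.inr (Or.inr ⟨by omega, ?_, ?_⟩))
    · rw [pvLand_eq]
      have e1 : x = d.1 := by simpa using h1
      have e2 : y + 1 = d.2 := by simpa using h2
      rw [e1, e2]
      exact hd3
    · rw [hdp]
      have e1 : d.1 = x := by simp at h1; omega
      have e2 : d.2 = y + 1 := by simp at h2; omega
      rw [e1, e2]
  · refine Or.inr (Or.inr (Or.inl ⟨by simp at h2; omega, ?_, ?_⟩))
    · rw [pvLand_eq]
      have e1 : x = d.1 := by simpa using h1
      have e2 : y - 1 = d.2 := by simp at h2; omega
      rw [e1, e2]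
      exact hd3
    · rw [hdp]
      have e1 : d.1 = x := by simp at h1; omega
      have e2 : d.2 = y - 1 := by simp at h2; omega
      rw [e1, e2]
  · refine Or.inr (Or.inl ⟨by simp at h2; omega, ?_, ?_⟩)
    · rw [pvLand_eq]
      have e1 : x + 1 = d.1 := by simpa using h2
      have e2 : y = d.2 := by simpa using h1
      rw [e1, e2]
      exact hd3
    · rw [hdp]
      have e1 : d.1 = x + 1 := by simp at h2; omega
      have e2 : d.2 = y := by simp at h1; omega
      rw [e1, e2]
  · refine Or.inl ⟨by simp at h2; omega, ?_, ?_⟩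
    · rw [pvLand_eq]
      have e1 : x - 1 = d.1 := by simp at h2; omega
      have e2 : y = d.2 := by simpa using h1
      rw [e1, e2]
      exact hd3
    · rw [hdp]
      have e1 : d.1 = x - 1 := by simp at h2; omega
      have e2 : d.2 = y := by simp at h1; omega
      rw [e1, e2]

-- everything pushed is an adjacency out of (x, y) (or was already on the stack)
theorem pvPush_sound {land : List (List Int)} {L W : Nat} {x y : Nat}
    {rest : List (Nat × Nat)} {c : Nat × Nat} (hx : landP land L W (x, y))
    (h : c ∈ pvPush land L W x y rest) : c ∈ rest ∨ stepR land L W (x, y) c := by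
  rw [pvPush_mem] at h
  have hx1 := hx.1
  have hx2 := hx.2.1
  rcases h with h | ⟨h1, h2, h3⟩ | ⟨h1, h2, h3⟩ | ⟨h1, h2, h3⟩ | ⟨h1, h2, h3⟩
  · exact Or.inl h
  · subst h3
    refine Or.inr ⟨hx, ⟨by omega, hx2, by rw [← pvLand_eq]; exact h2⟩, Or.inr ⟨rfl, Or.inr (by simp; omega)⟩⟩
  · subst h3
    refine Or.inr ⟨hx, ⟨h1, hx2, by rw [← pvLand_eq]; exact h2⟩, Or.inr ⟨rfl, Or.inl rfl⟩⟩
  · subst h3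
    refine Or.inr ⟨hx, ⟨hx1, by omega, by rw [← pvLand_eq]; exact h2⟩, Or.inl ⟨rfl, Or.inr (by simp; omega)⟩⟩
  · subst h3
    refine Or.inr ⟨hx, ⟨hx1, h1, by rw [← pvLand_eq]; exact h2⟩, Or.inl ⟨rfl, Or.inl rfl⟩⟩

-- characterisation of B's whole check-on-pop DFS
theorem dfsF_char (land : List (List Int)) (L W : Nat) :
    ∀ (n : Nat) (seen : List Bool) (stk comp : List (Nat × Nat)),
      5 * cfF seen + stk.length = n →
      (∀ c ∈ stk, landP land L W c) →
      (∀ c, memF L W seen c → ∀ d, stepR land L W c d → memF L W seen d ∨ d ∈ stk) →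
      (pvDfs land L W seen stk comp).1.length = seen.length ∧
      (∀ c, memF L W (pvDfs land L W seen stk comp).1 c ↔
        memF L W seen c ∨ ∃ s ∈ stk, ReachR land L W s c) ∧
      cfF (pvDfs land L W seen stk comp).1 + (pvDfs land L W seen stk comp).2.length =
        cfF seen + comp.length ∧
      (∀ c, c ∈ (pvDfs land L W seen stk comp).2 ↔
        c ∈ comp ∨ (memF L W (pvDfs land L W seen stk comp).1 c ∧ ¬ memF L W seen c)) ∧
      (∀ c, memF L W (pvDfs land L W seen stk comp).1 c →
        ∀ d, stepR land L W c d → memF L W (pvDfs land L W seen stk comp).1 d) := by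
  intro n
  induction n using Nat.strong_induction_on with
  | _ n ihn =>
  intro seen stk comp hn h1 h2
  cases stk with
  | nil =>
    rw [pvDfs]
    refine ⟨rfl, ?_, by simp, ?_, ?_⟩
    · intro c
      simp
    · intro c
      constructor
      · intro h
        exact Or.inl h
      · rintro (h | ⟨ha, hb⟩)
        · exact h
        · exact absurd ha hb
    · intro c hc d hd
      rcases h2 c hc d hd with h | h
      · exact h
      · simp at h
  | cons xy rest =>
    obtain ⟨x, y⟩ := xy
    rw [pvDfs]
    have hxl : landP land L W (x, y) := h1 (x, y) List.mem_cons_self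
    have hx1 := hxl.1
    have hx2 := hxl.2.1
    by_cases hseen : seen.getD (x * W + y) true = true
    · rw [dif_pos hseen]
      have hmx : memF L W seen (x, y) := ⟨hx1, hx2, hseen⟩
      have h2' : ∀ c, memF L W seen c → ∀ d, stepR land L W c d →
          memF L W seen d ∨ d ∈ rest := by
        intro c hc d hd
        rcases h2 c hc d hd with h | h
        · exact Or.inl h
        · rcases List.mem_cons.mp h with h | h
          · exact Or.inl (h ▸ hmx)
          · exact Or.inr h
      have hmeas : 5 * cfF seen + rest.length < n := by
        simp only [List.length_cons] at hn
        omega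
      obtain ⟨C0, C1, C2, C3, C4⟩ := ihn _ hmeas seen rest comp rfl
        (fun c hc => h1 c (List.mem_cons_of_mem _ hc)) h2'
      refine ⟨C0, ?_, C2, C3, C4⟩
      intro c
      rw [C1 c]
      constructor
      · rintro (h | ⟨s, hs, hr⟩)
        · exact Or.inl h
        · exact Or.inr ⟨s, List.mem_cons_of_mem _ hs, hr⟩
      · rintro (h | ⟨s, hs, hr⟩)
        · exact Or.inl h
        · rcases List.mem_cons.mp hs with h | h
          · have hfinx : memF L W (pvDfs land L W seen rest comp).1 (x, y) :=
              (C1 (x, y)).mpr (Or.inl hmx)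
            exact (C1 c).mp (reach_of_closed C4 hfinx (h ▸ hr))
          · exact Or.inr ⟨s, h, hr⟩
    · rw [dif_neg hseen]
      have hgf : seen.getD (x * W + y) true = false := by
        cases hb : seen.getD (x * W + y) true
        · rfl
        · exact absurd hb hseen
      have hilt : x * W + y < seen.length := getD_false_lt hgf
      have hnm : ¬ memF L W seen (x, y) := by
        rintro ⟨_, _, hh⟩
        exact hseen hh
      have hset := memF_set (s := seen) hx1 hx2 hilt
      have hcf := cfF_set_true seen (x * W + y) hgf
      have h1' : ∀ c ∈ pvPush land L W x y rest, landP land L W c := by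
        intro c hc
        rcases pvPush_sound hxl hc with h | h
        · exact h1 c (List.mem_cons_of_mem _ h)
        · exact h.2.1
      have h2' : ∀ c, memF L W (seen.set (x * W + y) true) c → ∀ d, stepR land L W c d →
          memF L W (seen.set (x * W + y) true) d ∨ d ∈ pvPush land L W x y rest := by
        intro c hc d hd
        rcases (hset c).mp hc with h | h
        · rcases h2 c h d hd with hh | hh
          · exact Or.inl ((hset d).mpr (Or.inl hh))
          · rcases List.mem_cons.mp hh with hh | hh
            · exact Or.inl ((hset d).mpr (Or.inr hh))
            · exact Or.inr ((pvPush_mem land L W x y rest d).mpr (Or.inl hh))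
        · subst h
          exact Or.inr (pvPush_complete hd rest)
      have hmeas : 5 * cfF (seen.set (x * W + y) true) +
          (pvPush land L W x y rest).length < n := by
        have hp := pvPush_length land L W x y rest
        simp only [List.length_cons] at hn
        omega
      obtain ⟨C0, C1, C2, C3, C4⟩ := ihn _ hmeas (seen.set (x * W + y) true)
        (pvPush land L W x y rest) (comp ++ [(x, y)]) rfl h1' h2'
      have hmono : ∀ c, memF L W (seen.set (x * W + y) true) c →
          memF L W (pvDfs land L W (seen.set (x * W + y) true)
            (pvPush land L W x y rest) (comp ++ [(x, y)])).1 c :=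
        fun c hc => (C1 c).mpr (Or.inl hc)
      have hmemx : memF L W (seen.set (x * W + y) true) (x, y) :=
        (hset (x, y)).mpr (Or.inr rfl)
      refine ⟨by rw [C0]; simp, ?_, ?_, ?_, C4⟩
      · intro c
        rw [C1 c]
        constructor
        · rintro (h | ⟨s, hs, hr⟩)
          · rcases (hset c).mp h with h | h
            · exact Or.inl h
            · exact Or.inr ⟨(x, y), List.mem_cons_self, h ▸ Relation.ReflTransGen.refl⟩
          · rcases pvPush_sound hxl hs with h | h
            · exact Or.inr ⟨s, List.mem_cons_of_mem _ h, hr⟩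
            · exact Or.inr ⟨(x, y), List.mem_cons_self, Relation.ReflTransGen.head h hr⟩
        · rintro (h | ⟨s, hs, hr⟩)
          · exact Or.inl ((hset c).mpr (Or.inl h))
          · rcases List.mem_cons.mp hs with h | h
            · subst h
              rcases (Relation.ReflTransGen.cases_head hr) with h | ⟨d, hd1, hd2⟩
              · exact Or.inl (h ▸ hmemx)
              · exact Or.inr ⟨d, pvPush_complete hd1 rest, hd2⟩
            · exact Or.inr ⟨s, (pvPush_mem land L W x y rest s).mpr (Or.inl h), hr⟩
      · simp only [List.length_append, List.length_singleton] at C2 ⊢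
        omega
      · intro c
        rw [C3 c]
        constructor
        · rintro (h | ⟨ha, hb⟩)
          · rcases List.mem_append.mp h with h | h
            · exact Or.inl h
            · simp only [List.mem_singleton] at h
              subst h
              exact Or.inr ⟨hmono _ hmemx, hnm⟩
          · refine Or.inr ⟨ha, fun hc => hb ((hset c).mpr (Or.inl hc))⟩
        · rintro (h | ⟨ha, hb⟩)
          · exact Or.inl (List.mem_append_left _ h)
          · by_cases hcx : c = (x, y)
            · exact Or.inl (List.mem_append_right _ (by simp [hcx]))
            · refine Or.inr ⟨ha, fun hc => ?_⟩
              rcases (hset c).mp hc with h | h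
              · exact hb h
              · exact hcx h

-- summing f over set(xs) is the Finset sum over xs.toFinset
theorem setfold_sum (xs : List Int) (f : Int → Int) :
    (PySem.Set.ofList xs).foldl (fun acc ℓ => acc + f ℓ) 0 = ∑ ℓ ∈ xs.toFinset, f ℓ := by
  rw [PySem.List.foldl_add]
  have hnd : (PySem.Set.ofList xs).Nodup := PySem.Set.nodup_ofList xs
  have htf : (PySem.Set.ofList xs).toFinset = xs.toFinset := by
    apply Finset.ext
    intro ℓ
    simp [List.mem_toFinset, PySem.Set.mem_ofList]
  rw [← htf, List.sum_toFinset f hnd]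
  simp

-- the column j of a W×L matrix, elementwise
theorem col_len {bl : List (List Int)} {L W : Nat} (h : Rect2 W L bl) {j : Nat}
    (hj : j < W) : (bl.getD j []).length = L := by
  obtain ⟨hl, hw⟩ := h
  rw [List.getD_eq_getElem bl [] (by omega)]
  exact hw _ (List.getElem_mem (by omega))

theorem col_mem {bl : List (List Int)} {L W : Nat} (h : Rect2 W L bl) {j : Nat}
    (hj : j < W) (ℓ : Int) :
    ℓ ∈ bl.getD j [] ↔ ∃ k, k < L ∧ pvGet2 bl j k 0 = ℓ := by
  have hlen := col_len h hj
  rw [List.mem_iff_getElem]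
  constructor
  · rintro ⟨k, hk, hv⟩
    refine ⟨k, by rw [← hlen]; exact hk, ?_⟩
    rw [← hv]
    exact List.getD_eq_getElem _ 0 hk
  · rintro ⟨k, hk, hv⟩
    refine ⟨k, by rw [hlen]; exact hk, ?_⟩
    rw [← hv]
    exact (List.getD_eq_getElem _ 0 (by rw [hlen]; exact hk)).symm

-- B's per-component fold over the distinct touched columns
theorem colsfold_char (t : Int) :
    ∀ (cols : List Int), cols.Nodup → ∀ (dct : PySem.Dict Int Int) (b : Int),
    (∀ k : Int,
      (cols.foldl (fun (p : PySem.Dict Int Int × Int) c =>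
        (p.1.insert c (p.1.getD c 0 + t), max p.2 (p.1.getD c 0 + t))) (dct, b)).1.getD k 0 =
      if k ∈ cols then dct.getD k 0 + t else dct.getD k 0) ∧
    (b ≤ (cols.foldl (fun (p : PySem.Dict Int Int × Int) c =>
        (p.1.insert c (p.1.getD c 0 + t), max p.2 (p.1.getD c 0 + t))) (dct, b)).2) ∧
    (∀ c ∈ cols, dct.getD c 0 + t ≤ (cols.foldl (fun (p : PySem.Dict Int Int × Int) c =>
        (p.1.insert c (p.1.getD c 0 + t), max p.2 (p.1.getD c 0 + t))) (dct, b)).2) ∧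
    (∀ m : Int, b ≤ m → (∀ c ∈ cols, dct.getD c 0 + t ≤ m) →
      (cols.foldl (fun (p : PySem.Dict Int Int × Int) c =>
        (p.1.insert c (p.1.getD c 0 + t), max p.2 (p.1.getD c 0 + t))) (dct, b)).2 ≤ m) := by
  intro cols
  induction cols with
  | nil =>
    intro _ dct b
    refine ⟨by intro k; simp, le_refl _, by intro c hc; simp at hc, ?_⟩
    intro m hm _
    simpa using hm
  | cons c cs ih =>
    intro hnd dct b
    simp only [List.foldl_cons]
    have hcb : c ∉ cs := (List.nodup_cons.mp hnd).1
    obtain ⟨ih1, ih2, ih3, ih4⟩ := ih (List.nodup_cons.mp hnd).2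
      (dct.insert c (dct.getD c 0 + t)) (max b (dct.getD c 0 + t))
    have hgetD : ∀ k : Int, (dct.insert c (dct.getD c 0 + t)).getD k 0 =
        if k = c then dct.getD c 0 + t else dct.getD k 0 := by
      intro k
      rw [PySem.Dict.getD_insert]
    refine ⟨?_, ?_, ?_, ?_⟩
    · intro k
      rw [ih1 k]
      by_cases hk : k ∈ cs
      · have hkc : k ≠ c := fun h => hcb (h ▸ hk)
        rw [if_pos hk, if_pos (List.mem_cons_of_mem c hk), hgetD k, if_neg hkc]
      · rw [if_neg hk, hgetD k]
        by_cases hkc : k = c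
        · subst hkc
          rw [if_pos rfl, if_pos List.mem_cons_self]
        · rw [if_neg hkc, if_neg (by simp [hkc, hk])]
    · exact le_trans (le_max_left _ _) ih2
    · intro e he
      rcases List.mem_cons.mp he with h | h
      · subst h
        exact le_trans (le_max_right _ _) ih2
      · have hec : e ≠ c := fun hh => hcb (hh ▸ h)
        have := ih3 e h
        rwa [hgetD e, if_neg hec] at this
    · intro m hbm hall
      apply ih4
      · exact max_le hbm (hall c List.mem_cons_self)
      · intro e he
        have hec : e ≠ c := fun hh => hcb (hh ▸ he)
        rw [hgetD e, if_neg hec]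
        exact hall e (List.mem_cons_of_mem c he)

-- bounds for a running-max fold
theorem foldmax_le_init (f : Nat → Int) (l : List Nat) :
    ∀ a : Int, a ≤ l.foldl (fun a j => max a (f j)) a := by
  induction l with
  | nil => intro a; simp
  | cons x xs ih => intro a; exact le_trans (le_max_left a (f x)) (ih _)

theorem foldmax_le_elem (f : Nat → Int) (l : List Nat) :
    ∀ (a : Int) (x : Nat), x ∈ l → f x ≤ l.foldl (fun a j => max a (f j)) a := by
  induction l with
  | nil => intro a x hx; simp at hx
  | cons y ys ih =>
    intro a x hx
    rcases List.mem_cons.mp hx with h | h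
    · subst h
      exact le_trans (le_max_right a (f x)) (foldmax_le_init f ys _)
    · exact ih _ x h

theorem foldmax_lub (f : Nat → Int) (l : List Nat) :
    ∀ (a m : Int), a ≤ m → (∀ x ∈ l, f x ≤ m) → l.foldl (fun a j => max a (f j)) a ≤ m := by
  induction l with
  | nil => intro a m ha _; simpa using ha
  | cons y ys ih =>
    intro a m ha hl
    exact ih _ m (max_le ha (hl y List.mem_cons_self)) fun x hx => hl x (List.mem_cons_of_mem y hx)

-- the coupled invariant between A's and B's scan states
def CI (land : List (List Int)) (L W : Nat)
    (stA : List (List Int) × List (List Bool) × Int × List Int)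
    (stB : List Bool × PySem.Dict Int Int × Int) : Prop :=
  (∀ i j : Nat, i < L → j < W → pvGet2 stA.2.1 i j true = stB.1.getD (i * W + j) true) ∧
  stB.1.length = L * W ∧
  Rect2 L W stA.2.1 ∧ Rect2 W L stA.1 ∧
  (∀ c, memM L W stA.2.1 c → ∀ d, stepR land L W c d → memM L W stA.2.1 d) ∧
  1 ≤ stA.2.2.1 ∧ (stA.2.2.2.length : Int) = stA.2.2.1 ∧
  stA.2.2.2.getD 0 0 = 0 ∧
  (∀ k : Nat, 0 ≤ stA.2.2.2.getD k 0) ∧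
  (∀ c : Nat × Nat, c.1 < L → c.2 < W →
    (memM L W stA.2.1 c → 1 ≤ pvGet2 stA.1 c.2 c.1 0 ∧ pvGet2 stA.1 c.2 c.1 0 < stA.2.2.1) ∧
    (¬ memM L W stA.2.1 c → pvGet2 stA.1 c.2 c.1 0 = 0)) ∧
  (∀ j : Nat, j < W → stB.2.1.getD (j : Int) 0 = colSumA stA.1 stA.2.2.2 j) ∧
  stB.2.2 = (List.range W).foldl (fun a j => max a (colSumA stA.1 stA.2.2.2 j)) 0

theorem bool_eq_of_iff {x y : Bool} (h : (x = true) ↔ (y = true)) : x = y := by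
  cases x <;> cases y <;> simp_all

theorem getD_append_lt (l l' : List Int) (k : Nat) (hk : k < l.length) (d : Int) :
    (l ++ l').getD k d = l.getD k d := by
  rw [List.getD_eq_getElem?_getD, List.getElem?_append_left hk, ← List.getD_eq_getElem?_getD]

theorem getD_append_len (l : List Int) (x : Int) (d : Int) :
    (l ++ [x]).getD l.length d = x := by
  rw [List.getD_eq_getElem?_getD, List.getElem?_append_right (le_refl _)]
  simp

theorem getD_append_gt (l : List Int) (x : Int) (k : Nat) (hk : l.length < k) (d : Int) :
    (l ++ [x]).getD k d = d := by
  rw [List.getD_eq_getElem?_getD]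
  rw [List.getElem?_eq_none (by simp; omega)]
  rfl

theorem ci_outer (land : List (List Int)) (L W : Nat)
    (stA : List (List Int) × List (List Bool) × Int × List Int)
    (stB : List Bool × PySem.Dict Int Int × Int)
    (i j : Nat) (hi : i < L) (hj : j < W) (h : CI land L W stA stB) :
    CI land L W (pvOuterA land L W stA i j) (pvOuterB land L W stB i j) := by
  obtain ⟨bl, vis, bn, fuel⟩ := stA
  obtain ⟨seen, dct, best⟩ := stB
  unfold CI at h ⊢
  dsimp only at h ⊢
  obtain ⟨hPT, hLEN, hRv, hRb, hcl, hbn1, hbnlen, hfuel0, hfuelnn, hlbl, hCS, hBEST⟩ := h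
  unfold pvOuterA pvOuterB
  dsimp only
  have hGuard : (pvLand land i j = 1 ∧ seen.getD (i * W + j) true = false) ↔
      (pvGet2 land i j 0 = 1 ∧ pvGet2 vis i j true = false) := by
    rw [pvLand_eq, ← hPT i j hi hj]
  by_cases htr : pvGet2 land i j 0 = 1 ∧ pvGet2 vis i j true = false
  case neg =>
    rw [if_neg htr, if_neg (fun hh => htr (hGuard.mp hh))]
    exact ⟨hPT, hLEN, hRv, hRb, hcl, hbn1, hbnlen, hfuel0, hfuelnn, hlbl, hCS, hBEST⟩
  case pos =>
  rw [if_pos htr, if_pos (hGuard.mpr htr)]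
  dsimp only
  have hls : landP land L W (i, j) := ⟨hi, hj, htr.1⟩
  have hnm : ¬ memM L W vis (i, j) := false_notMemM htr.2
  have hv1 : Rect2 L W (pvSet2 vis i j true) := rect2_set hRv i j true
  have hb1 : Rect2 W L (pvSet2 bl j i bn) := rect2_set hRb j i bn
  have hmem1 : ∀ c, memM L W (pvSet2 vis i j true) c ↔ memM L W vis c ∨ c = (i, j) :=
    memM_set hRv (c0 := (i, j)) hi hj
  have hq1 : ∀ c ∈ [(i, j)], landP land L W c ∧ memM L W (pvSet2 vis i j true) c := by
    intro c hc
    rw [List.mem_singleton] at hc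
    subst hc
    exact ⟨hls, (hmem1 _).mpr (Or.inr rfl)⟩
  have hcl1 : ∀ c, memM L W (pvSet2 vis i j true) c → c ∉ [(i, j)] →
      ∀ d, stepR land L W c d → memM L W (pvSet2 vis i j true) d := by
    intro c hmc hcq d hstep
    rcases (hmem1 c).mp hmc with h | h
    · exact (hmem1 d).mpr (Or.inl (hcl c h d hstep))
    · exact absurd (List.mem_singleton.mpr h) hcq
  obtain ⟨hAv, hAb, hAmem, hAcons, hAle, hAbl1, hAbl2⟩ :=
    bfsA_char land L W bn _ (pvSet2 bl j i bn) (pvSet2 vis i j true) [(i, j)] 1 rfl hv1 hb1 hq1 hcl1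
  -- B's DFS on the same component
  have hBq1 : ∀ c ∈ [(i, j)], landP land L W c := by
    intro c hc
    rw [List.mem_singleton] at hc
    exact hc ▸ hls
  have hBcl : ∀ c, memF L W seen c → ∀ d, stepR land L W c d →
      memF L W seen d ∨ d ∈ [(i, j)] := by
    intro c hc d hd
    have hcM : memM L W vis c := by
      obtain ⟨h1, h2, h3⟩ := hc
      exact ⟨h1, h2, by rw [hPT c.1 c.2 h1 h2]; exact h3⟩
    have hdM := hcl c hcM d hd
    obtain ⟨h1, h2, h3⟩ := hdM
    exact Or.inl ⟨h1, h2, by rw [← hPT d.1 d.2 h1 h2]; exact h3⟩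
  obtain ⟨C0, C1, C2, C3, C4⟩ :=
    dfsF_char land L W _ seen [(i, j)] [] rfl hBq1 hBcl
  set RA := pvBfsA land L W bn (pvSet2 bl j i bn) (pvSet2 vis i j true) [(i, j)] 1 with hRA
  set RB := pvDfs land L W seen [(i, j)] [] with hRB
  have hnmF : ¬ memF L W seen (i, j) := by
    rintro ⟨_, _, hh⟩
    rw [← hPT i j hi hj] at hh
    rw [htr.2] at hh
    exact Bool.false_ne_true hh
  have F4 : ∀ c, ReachR land L W (i, j) c → ¬ memM L W vis c := by
    intro c hr hm
    have h1 : ReachR land L W c (i, j) := reach_symm hr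
    rcases closed_reach (q := []) (fun c hmc _ d hstep => hcl c hmc d hstep) hm h1 with h2 | ⟨u, hu, _⟩
    · exact hnm h2
    · exact absurd hu (List.not_mem_nil)
  have F4F : ∀ c, ReachR land L W (i, j) c → ¬ memF L W seen c := by
    intro c hr hm
    obtain ⟨h1, h2, h3⟩ := hm
    exact F4 c hr ⟨h1, h2, by rw [hPT c.1 c.2 h1 h2]; exact h3⟩
  have F1 : ∀ c, memM L W RA.2.1 c ↔ memM L W vis c ∨ ReachR land L W (i, j) c := by
    intro c
    rw [hAmem c]
    constructor
    · rintro (h | ⟨s, hs, hreach⟩)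
      · rcases (hmem1 c).mp h with h' | h'
        · exact Or.inl h'
        · exact Or.inr (h' ▸ Relation.ReflTransGen.refl)
      · rw [List.mem_singleton] at hs
        exact Or.inr (hs ▸ hreach)
    · rintro (h | h)
      · exact Or.inl ((hmem1 c).mpr (Or.inl h))
      · exact Or.inr ⟨(i, j), List.mem_singleton.mpr rfl, h⟩
  have F2 : ∀ c, memF L W RB.1 c ↔ memM L W vis c ∨ ReachR land L W (i, j) c := by
    intro c
    rw [C1 c]
    constructor
    · rintro (h | ⟨s, hs, hreach⟩)
      · obtain ⟨h1, h2, h3⟩ := h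
        exact Or.inl ⟨h1, h2, by rw [hPT c.1 c.2 h1 h2]; exact h3⟩
      · rw [List.mem_singleton] at hs
        exact Or.inr (hs ▸ hreach)
    · rintro (h | h)
      · obtain ⟨h1, h2, h3⟩ := h
        exact Or.inl ⟨h1, h2, by rw [← hPT c.1 c.2 h1 h2]; exact h3⟩
      · exact Or.inr ⟨(i, j), List.mem_singleton.mpr rfl, h⟩
  have FPT : ∀ a b : Nat, a < L → b < W →
      pvGet2 RA.2.1 a b true = RB.1.getD (a * W + b) true := by
    intro a b ha hb
    apply bool_eq_of_iff
    constructor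
    · intro hh
      exact ((F2 (a, b)).mpr ((F1 (a, b)).mp ⟨ha, hb, hh⟩)).2.2
    · intro hh
      exact ((F1 (a, b)).mpr ((F2 (a, b)).mp ⟨ha, hb, hh⟩)).2.2
  have hbrA : pvFalse vis = cfF seen := count_bridge L W vis seen hRv hLEN hPT
  have hbrB : pvFalse RA.2.1 = cfF RB.1 :=
    count_bridge L W RA.2.1 RB.1 hAv (by rw [C0]; exact hLEN) FPT
  have hps := pvFalse_set_true vis i j htr.2
  have F5 : RA.2.2 = (RB.2.length : Int) := by
    simp only [List.length_nil] at C2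
    omega
  have F7 : ∀ c, c ∈ RB.2 ↔ ReachR land L W (i, j) c := by
    intro c
    rw [C3 c]
    constructor
    · rintro (h | ⟨h1, h2⟩)
      · exact absurd h (List.not_mem_nil)
      · rcases (F2 c).mp h1 with h' | h'
        · exfalso
          apply h2
          obtain ⟨a1, a2, a3⟩ := h'
          exact ⟨a1, a2, by rw [← hPT c.1 c.2 a1 a2]; exact a3⟩
        · exact h'
    · intro hr
      refine Or.inr ⟨(F2 c).mpr (Or.inr hr), F4F c hr⟩
  have F9a : ∀ c : Nat × Nat, ReachR land L W (i, j) c → pvGet2 RA.1 c.2 c.1 0 = bn := by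
    intro c hr
    have hlc : landP land L W c := reach_land hls hr
    by_cases hcij : c = (i, j)
    · rw [hcij]
      rw [hAbl2 (i, j) hi hj (fun _ => (hmem1 (i, j)).mpr (Or.inr rfl))]
      show pvGet2 (pvSet2 bl j i bn) j i 0 = bn
      rw [get2_set2 hRb hj hi, if_pos ⟨rfl, rfl⟩]
    · have hnv1 : ¬ memM L W (pvSet2 vis i j true) c := by
        intro hm1
        rcases (hmem1 c).mp hm1 with h' | h'
        · exact F4 c hr h'
        · exact hcij h'
      exact hAbl1 c hlc.1 hlc.2.1 ((F1 c).mpr (Or.inr hr)) hnv1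
  have F9b : ∀ c : Nat × Nat, c.1 < L → c.2 < W → ¬ ReachR land L W (i, j) c →
      pvGet2 RA.1 c.2 c.1 0 = pvGet2 bl c.2 c.1 0 := by
    intro c h1 h2 hnr
    have hcij : c ≠ (i, j) := fun hh => hnr (hh ▸ Relation.ReflTransGen.refl)
    rw [hAbl2 c h1 h2 (fun hm => by
      rcases (F1 c).mp hm with h' | h'
      · exact (hmem1 c).mpr (Or.inl h')
      · exact absurd h' hnr)]
    rw [get2_set2 hRb hj hi, if_neg]
    intro ⟨ha, hb⟩
    exact hcij (Prod.ext_iff.mpr ⟨hb, ha⟩)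
  -- the touched-column set
  have hC1 : ∀ k : Nat, ((k : Int) ∈ PySem.Set.ofList (RB.2.map (fun c => (c.2 : Int)))) ↔
      ∃ a : Nat, ReachR land L W (i, j) (a, k) := by
    intro k
    rw [PySem.Set.mem_ofList]
    rw [List.mem_map]
    constructor
    · rintro ⟨cell, hcell, hcast⟩
      have : cell.2 = k := by exact_mod_cast hcast
      refine ⟨cell.1, ?_⟩
      rw [show ((cell.1, k) : Nat × Nat) = cell by rw [← this]]
      exact (F7 cell).mp hcell
    · rintro ⟨a, hr⟩
      exact ⟨(a, k), (F7 (a, k)).mpr hr, rfl⟩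
  have hcolsnd := PySem.Set.nodup_ofList (RB.2.map (fun c => (c.2 : Int)))
  obtain ⟨hD, hble, hble2, hblub⟩ := colsfold_char ((RB.2.length : Int))
    (PySem.Set.ofList (RB.2.map (fun c => (c.2 : Int)))) hcolsnd dct best
  have hcolsW : ∀ x ∈ PySem.Set.ofList (RB.2.map (fun c => (c.2 : Int))),
      ∃ k : Nat, k < W ∧ x = (k : Int) := by
    intro x hx
    rw [PySem.Set.mem_ofList, List.mem_map] at hx
    obtain ⟨cell, hcell, hcast⟩ := hx
    have hlc : landP land L W cell := reach_land hls ((F7 cell).mp hcell)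
    exact ⟨cell.2, hlc.2.1, hcast.symm⟩
  -- the per-column sum identity
  have hcolkey : ∀ k : Nat, k < W →
      colSumA RA.1 (fuel ++ [RA.2.2]) k =
        colSumA bl fuel k +
          (if (k : Int) ∈ PySem.Set.ofList (RB.2.map (fun c => (c.2 : Int)))
            then (RB.2.length : Int) else 0) := by
    intro k hk
    have hcolA := col_mem hAb hk
    have hcolB := col_mem hRb hk
    have hlenA := col_len hAb hk
    have hlenB := col_len hRb hk
    unfold colSumA
    rw [setfold_sum (RA.1.getD k []) (fun ℓ => (fuel ++ [RA.2.2]).getD ℓ.toNat 0),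
      setfold_sum (bl.getD k []) (fun ℓ => fuel.getD ℓ.toNat 0)]
    have hSbound : ∀ ℓ ∈ (bl.getD k []).toFinset, 0 ≤ ℓ ∧ ℓ < bn := by
      intro ℓ hℓ
      rw [List.mem_toFinset] at hℓ
      obtain ⟨a, haL, hval⟩ := (hcolB ℓ).mp hℓ
      by_cases hmv : memM L W vis (a, k)
      · have h' := (hlbl (a, k) haL hk).1 hmv
        dsimp only at h'
        omega
      · have h' := (hlbl (a, k) haL hk).2 hmv
        dsimp only at h'
        omega
    have hf'lt : ∀ ℓ : Int, 0 ≤ ℓ → ℓ < bn →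
        (fuel ++ [RA.2.2]).getD ℓ.toNat 0 = fuel.getD ℓ.toNat 0 := by
      intro ℓ h1 h2
      exact getD_append_lt fuel [RA.2.2] ℓ.toNat (by omega) 0
    have hflen : 1 ≤ fuel.length := by omega
    by_cases htch : (k : Int) ∈ PySem.Set.ofList (RB.2.map (fun c => (c.2 : Int)))
    · rw [if_pos htch]
      obtain ⟨a0, hr0⟩ := (hC1 k).mp htch
      have ha0L : a0 < L := (reach_land hls hr0).1
      have hsets : (RA.1.getD k []).toFinset.erase 0 =
          insert bn ((bl.getD k []).toFinset.erase 0) := by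
        apply Finset.ext
        intro ℓ
        simp only [Finset.mem_erase, Finset.mem_insert, List.mem_toFinset]
        constructor
        · rintro ⟨hne, hmem⟩
          obtain ⟨a, haL, hval⟩ := (hcolA ℓ).mp hmem
          by_cases hra : ReachR land L W (i, j) (a, k)
          · left
            rw [← hval]
            exact F9a (a, k) hra
          · right
            refine ⟨hne, (hcolB ℓ).mpr ⟨a, haL, ?_⟩⟩
            rw [← hval]
            exact (F9b (a, k) haL hk hra).symm
        · rintro (hbn | ⟨hne, hmem⟩)
          · subst hbn
            exact ⟨by omega, (hcolA ℓ).mpr ⟨a0, ha0L, F9a (a0, k) hr0⟩⟩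
          · obtain ⟨a, haL, hval⟩ := (hcolB ℓ).mp hmem
            have hmemv : memM L W vis (a, k) := by
              by_contra hnv
              have h' := (hlbl (a, k) haL hk).2 hnv
              dsimp only at h'
              rw [hval] at h'
              exact hne h'
            have hnr : ¬ ReachR land L W (i, j) (a, k) := fun hr => F4 _ hr hmemv
            refine ⟨hne, (hcolA ℓ).mpr ⟨a, haL, ?_⟩⟩
            rw [F9b (a, k) haL hk hnr]
            exact hval
      have h0' : (fun ℓ : Int => (fuel ++ [RA.2.2]).getD ℓ.toNat 0) 0 = 0 := by
        show (fuel ++ [RA.2.2]).getD (0 : Int).toNat 0 = 0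
        rw [getD_append_lt fuel [RA.2.2] _ (by simp; omega) 0]
        simpa using hfuel0
      have h0 : (fun ℓ : Int => fuel.getD ℓ.toNat 0) 0 = 0 := by
        simpa using hfuel0
      have hbn_notin : bn ∉ ((bl.getD k []).toFinset.erase 0) := by
        intro hmem
        have := hSbound bn (Finset.mem_erase.mp hmem).2
        omega
      have hf'bn : (fuel ++ [RA.2.2]).getD bn.toNat 0 = RA.2.2 := by
        have hh : bn.toNat = fuel.length := by omega
        rw [hh, getD_append_len]
      calc ∑ ℓ ∈ (RA.1.getD k []).toFinset, (fuel ++ [RA.2.2]).getD ℓ.toNat 0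
          = ∑ ℓ ∈ (RA.1.getD k []).toFinset.erase 0,
              (fuel ++ [RA.2.2]).getD ℓ.toNat 0 :=
            (Finset.sum_erase (f := fun ℓ : Int => (fuel ++ [RA.2.2]).getD ℓ.toNat 0) _ h0').symm
        _ = ∑ ℓ ∈ insert bn ((bl.getD k []).toFinset.erase 0),
              (fuel ++ [RA.2.2]).getD ℓ.toNat 0 := by rw [hsets]
        _ = RA.2.2 + ∑ ℓ ∈ (bl.getD k []).toFinset.erase 0,
              (fuel ++ [RA.2.2]).getD ℓ.toNat 0 := by
              rw [Finset.sum_insert hbn_notin, hf'bn]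
        _ = RA.2.2 + ∑ ℓ ∈ (bl.getD k []).toFinset.erase 0, fuel.getD ℓ.toNat 0 := by
              congr 1
              apply Finset.sum_congr rfl
              intro ℓ hℓ
              have := hSbound ℓ (Finset.mem_erase.mp hℓ).2
              exact hf'lt ℓ this.1 this.2
        _ = RA.2.2 + ∑ ℓ ∈ (bl.getD k []).toFinset, fuel.getD ℓ.toNat 0 := by
              rw [Finset.sum_erase (f := fun ℓ : Int => fuel.getD ℓ.toNat 0) _ h0]
        _ = (∑ ℓ ∈ (bl.getD k []).toFinset, fuel.getD ℓ.toNat 0) + (RB.2.length : Int) := by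
              rw [← F5]
              ring
    · rw [if_neg htch]
      have hcols_eq : RA.1.getD k [] = bl.getD k [] := by
        apply List.ext_getElem (by rw [hlenA, hlenB])
        intro a h1 h2
        have haL : a < L := by rw [hlenA] at h1; exact h1
        have hnr : ¬ ReachR land L W (i, j) (a, k) := fun hr => htch ((hC1 k).mpr ⟨a, hr⟩)
        rw [← List.getD_eq_getElem _ 0 h1, ← List.getD_eq_getElem _ 0 h2]
        show pvGet2 RA.1 k a 0 = pvGet2 bl k a 0
        exact F9b (a, k) haL hk hnr
      rw [hcols_eq, add_zero]
      apply Finset.sum_congr rfl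
      intro ℓ hℓ
      have := hSbound ℓ hℓ
      exact hf'lt ℓ this.1 this.2
  refine ⟨FPT, by rw [C0]; exact hLEN, hAv, hAb, ?_, by omega, ?_, ?_, ?_, ?_, ?_, ?_⟩
  · -- closure
    intro c hmc d hstep
    rcases (F1 c).mp hmc with h | h
    · exact (F1 d).mpr (Or.inl (hcl c h d hstep))
    · exact (F1 d).mpr (Or.inr (Relation.ReflTransGen.tail h hstep))
  · -- fuel length
    simp only [List.length_append, List.length_singleton]
    push_cast
    omega
  · -- fuel 0
    rw [getD_append_lt fuel [RA.2.2] 0 (by omega) 0]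
    exact hfuel0
  · -- fuel nonneg
    intro k
    rcases lt_trichotomy k fuel.length with h | h | h
    · rw [getD_append_lt fuel [RA.2.2] k h 0]
      exact hfuelnn k
    · subst h
      rw [getD_append_len]
      omega
    · rw [getD_append_gt fuel _ k h 0]
  · -- labels
    intro c h1 h2
    constructor
    · intro hmc
      rcases (F1 c).mp hmc with h | h
      · rw [F9b c h1 h2 (fun hr => F4 c hr h)]
        have := (hlbl c h1 h2).1 h
        omega
      · rw [F9a c h]
        omega
    · intro hmc
      have hnv : ¬ memM L W vis c := fun hh => hmc ((F1 c).mpr (Or.inl hh))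
      have hnr : ¬ ReachR land L W (i, j) c := fun hh => hmc ((F1 c).mpr (Or.inr hh))
      rw [F9b c h1 h2 hnr]
      exact (hlbl c h1 h2).2 hnv
  · -- CS
    intro k hk
    rw [hD (k : Int), hcolkey k hk, hCS k hk]
    split <;> omega
  · -- BEST
    have htnn : (0 : Int) ≤ (RB.2.length : Int) := by positivity
    have hbest0 : (0 : Int) ≤ best := by
      rw [hBEST]
      exact foldmax_le_init _ _ _
    apply le_antisymm
    · apply hblub
      · rw [hBEST]
        apply foldmax_lub
        · exact foldmax_le_init _ _ _
        · intro x hx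
          have hxW : x < W := List.mem_range.mp hx
          have h1 : colSumA bl fuel x ≤ colSumA RA.1 (fuel ++ [RA.2.2]) x := by
            rw [hcolkey x hxW]
            split <;> omega
          exact le_trans h1 (foldmax_le_elem _ _ _ x hx)
      · intro c hc
        obtain ⟨k, hkW, hck⟩ := hcolsW c hc
        subst hck
        rw [hCS k hkW]
        have : colSumA bl fuel k + (RB.2.length : Int) = colSumA RA.1 (fuel ++ [RA.2.2]) k := by
          rw [hcolkey k hkW, if_pos hc]
        rw [this]
        exact foldmax_le_elem _ _ _ k (List.mem_range.mpr hkW)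
    · apply foldmax_lub
      · exact le_trans hbest0 hble
      · intro x hx
        have hxW : x < W := List.mem_range.mp hx
        rw [hcolkey x hxW]
        by_cases hxc : (x : Int) ∈ PySem.Set.ofList (RB.2.map (fun c => (c.2 : Int)))
        · rw [if_pos hxc]
          have := hble2 (x : Int) hxc
          rw [hCS x hxW] at this
          omega
        · rw [if_neg hxc]
          simp only [add_zero]
          have h1 : colSumA bl fuel x ≤ best := by
            rw [hBEST]
            exact foldmax_le_elem _ _ _ x hx
          omega

theorem ci_init (land : List (List Int)) (L W : Nat) :
    CI land L W
      (List.replicate W (List.replicate L (0 : Int)), List.replicate L (List.replicate W false),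
        (1 : Int), ([0] : List Int))
      (List.replicate (L * W) false, PySem.Dict.empty, (0 : Int)) := by
  have hrectV : Rect2 L W (List.replicate L (List.replicate W false)) := by
    refine ⟨List.length_replicate, ?_⟩
    intro r hr
    rw [List.eq_of_mem_replicate hr]
    exact List.length_replicate
  have hrectB : Rect2 W L (List.replicate W (List.replicate L (0 : Int))) := by
    refine ⟨List.length_replicate, ?_⟩
    intro r hr
    rw [List.eq_of_mem_replicate hr]
    exact List.length_replicate
  have hnomem : ∀ c : Nat × Nat, ¬ memM L W (List.replicate L (List.replicate W false)) c := by
    rintro c ⟨h1, h2, h3⟩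
    unfold pvGet2 at h3
    simp [List.getD_eq_getElem?_getD, h1, h2] at h3
  have hbl0 : ∀ (a b : Nat), a < L → b < W →
      pvGet2 (List.replicate W (List.replicate L (0 : Int))) b a 0 = 0 := by
    intro a b ha hb
    unfold pvGet2
    simp [List.getD_eq_getElem?_getD, ha, hb]
  have hcol0 : ∀ j : Nat, j < W →
      colSumA (List.replicate W (List.replicate L (0 : Int))) [0] j = 0 := by
    intro j hj
    unfold colSumA
    rw [List.getD_eq_getElem _ _ (by simpa using hj), List.getElem_replicate]
    rcases Nat.eq_zero_or_pos L with h | h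
    · subst h
      simp [PySem.Set.ofList]
    · rw [setfold_sum]
      have : (List.replicate L (0 : Int)).toFinset = {0} := by
        apply Finset.ext
        intro ℓ
        simp [List.mem_replicate]
        omega
      rw [this]
      simp
  refine ⟨?_, by simp, hrectV, hrectB, ?_, le_refl _, by simp, by simp, ?_, ?_, ?_, ?_⟩
  · intro i j hi hj
    have hij := idx_lt hi hj
    simp [pvGet2, List.getD_eq_getElem?_getD, hi, hj, hij]
  · intro c hc
    exact absurd hc (hnomem c)
  · intro k
    cases k <;> simp [List.getD]
  · intro c h1 h2
    constructor
    · intro hc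
      exact absurd hc (hnomem c)
    · intro _
      exact hbl0 c.1 c.2 h1 h2
  · intro j hj
    rw [hcol0 j hj]
    rfl
  · symm
    apply le_antisymm
    · apply foldmax_lub
      · exact le_refl _
      · intro x hx
        rw [hcol0 x (by simpa using hx)]
    · exact foldmax_le_init _ _ _

theorem solution_eq_alt (land : List (List Int)) : solution land = solution_alt land := by
  have inner : ∀ (i : Nat), i < land.length → ∀ (l2 : List Nat),
      (∀ j ∈ l2, j < (land.headD []).length) → ∀ stA stB,
      CI land land.length (land.headD []).length stA stB →
      CI land land.length (land.headD []).length
        (l2.foldl (fun st j => pvOuterA land land.length (land.headD []).length st i j) stA)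
        (l2.foldl (fun st j => pvOuterB land land.length (land.headD []).length st i j) stB) := by
    intro i hi l2
    induction l2 with
    | nil => intro _ stA stB h; exact h
    | cons j js ihl =>
      intro hmem stA stB h
      simp only [List.foldl_cons]
      exact ihl (fun x hx => hmem x (List.mem_cons_of_mem j hx)) _ _
        (ci_outer land land.length (land.headD []).length stA stB i j hi
          (hmem j List.mem_cons_self) h)
  have outer : ∀ (l1 : List Nat), (∀ i ∈ l1, i < land.length) → ∀ stA stB,
      CI land land.length (land.headD []).length stA stB →
      CI land land.length (land.headD []).length
        (l1.foldl (fun st i => (List.range (land.headD []).length).foldl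
          (fun st j => pvOuterA land land.length (land.headD []).length st i j) st) stA)
        (l1.foldl (fun st i => (List.range (land.headD []).length).foldl
          (fun st j => pvOuterB land land.length (land.headD []).length st i j) st) stB) := by
    intro l1
    induction l1 with
    | nil => intro _ stA stB h; exact h
    | cons i is ihl =>
      intro hmem stA stB h
      simp only [List.foldl_cons]
      exact ihl (fun x hx => hmem x (List.mem_cons_of_mem i hx)) _ _
        (inner i (hmem i List.mem_cons_self) (List.range (land.headD []).length)
          (fun j hj => List.mem_range.mp hj) _ _ h)
  have hCI := outer (List.range land.length) (fun i hi => List.mem_range.mp hi) _ _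
    (ci_init land land.length (land.headD []).length)
  exact hCI.2.2.2.2.2.2.2.2.2.2.2.symm

-- ===== VERDICT (by name: the statement is the Claim_ definition above) =====
theorem solution_spec : Claim_equal_solution := by
  intro land _ _
  unfold Spec_solution
  exact solution_eq_alt land
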